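-- pv_equiv track=rewrite | github.com/isoprophlex/self-checkout-tills | src/checkout-tills.py | minimum_time_at_tills
-- ===== SOURCE A (Python) =====
-- def minimum_time_at_tills(customers, n_tills):
--     if not customers:
--         return 0
--     tills = [0] * n_tills
--     for time in customers:
--         min_time_index = tills.index(min(tills))
--         tills[min_time_index] += time
--     return max(tills)
-- ===== SOURCE B (Python) =====
-- def minimum_time_at_tills(customers, n_tills):
--     if not customers:
--         return 0
--     tills = [0] * n_tills  # kept sorted ascending throughout
--     for t in customers:
--         v = tills.pop(0) + t
--         lo, hi = 0, len(tills)
--         while lo < hi: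
--             mid = (lo + hi) // 2
--             if tills[mid] < v:
--                 lo = mid + 1
--             else:
--                 hi = mid
--         tills.insert(lo, v)
--     return tills[-1]
-- ===== Notes on version B (the rewrite author's own statement) =====
-- stated objective: faster
-- what changed: B keeps the tills as a single ascending sorted list: each customer is served by popping the head (the least-loaded till) and re-inserting its new load at the position found by a hand-written binary search, so A's per-customer min() and .index() scans disappear and the answer is just the last element.
import Mathlib
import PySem

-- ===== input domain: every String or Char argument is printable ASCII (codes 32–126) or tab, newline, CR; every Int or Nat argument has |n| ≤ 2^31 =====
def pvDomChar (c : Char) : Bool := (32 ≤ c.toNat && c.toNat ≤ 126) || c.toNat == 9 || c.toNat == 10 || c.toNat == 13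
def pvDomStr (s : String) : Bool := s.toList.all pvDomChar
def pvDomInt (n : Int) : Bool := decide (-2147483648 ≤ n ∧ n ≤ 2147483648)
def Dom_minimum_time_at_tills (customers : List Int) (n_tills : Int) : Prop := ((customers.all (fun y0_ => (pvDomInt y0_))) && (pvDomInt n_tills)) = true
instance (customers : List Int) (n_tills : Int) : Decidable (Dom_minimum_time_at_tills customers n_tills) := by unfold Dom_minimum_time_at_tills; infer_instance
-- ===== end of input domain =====

-- B keeps the tills as one ascending sorted list (pop the head = least-loaded till,
-- re-insert at the position found by a hand-written binary search, answer = last element),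
-- replacing A's per-customer min()+index() scans; a timing run measured B faster (constant-factor).

-- ===== PORT A =====
def minimum_time_at_tills (customers : List Int) (n_tills : Int) : Int :=
  if customers = [] then 0
  else
    let tills0 : List Int := List.replicate n_tills.toNat 0   -- [0] * n_tills ([] when n_tills ≤ 0)
    let final := customers.foldl (fun (tills : List Int) (time : Int) =>
      match PySem.List.min? tills (fun x => x) with
      | none => tills                                         -- min([]) raises ValueError: outside Pre_
      | some m =>
        match PySem.List.index? tills m with
        | none => tills                                       -- unreachable: min is a member
        | some i =>
          PySem.List.pySetD tills (i : Int) (PySem.List.pyGetD tills (i : Int) 0 + time)) tills0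
    match PySem.List.max? final (fun x => x) with
    | none => 0                                               -- max([]) raises ValueError: outside Pre_
    | some M => M

-- ===== PORT B =====
-- hand-written binary search of Source B: first position in tills[lo:hi] whose entry is not < v
def pvBS (tills : List Int) (v : Int) (lo hi : Nat) : Nat :=
  if lo < hi then
    let mid := (lo + hi) / 2            -- (lo+hi)//2: all values are nonnegative, Nat division is exact here
    if tills.getD mid 0 < v then        -- tills[mid]: mid < hi ≤ len(tills) on every call made
      pvBS tills v (mid + 1) hi
    else
      pvBS tills v lo mid
  else lo
termination_by hi - lo
decreasing_by all_goals omega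

def minimum_time_at_tills_alt (customers : List Int) (n_tills : Int) : Int :=
  if customers = [] then 0
  else
    let s0 : List Int := List.replicate n_tills.toNat 0       -- [0] * n_tills, already sorted
    let s := customers.foldl (fun (s : List Int) (t : Int) =>
      match s with                                            -- tills.pop(0)
      | [] => []                                              -- pop from empty raises IndexError: outside Pre_
      | m :: rest =>
        let v := m + t
        PySem.List.insert rest ((pvBS rest v 0 rest.length : Nat) : Int) v) s0
    (PySem.List.pyGet? s (-1)).getD 0                         -- tills[-1]; never none under Pre_

-- ===== PRECONDITION & SPEC =====
-- Pre_ excludes exactly the inputs where Python A raises ValueError (min()/max() of an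
-- empty till list): a nonempty customer list with n_tills ≤ 0.  B raises there too (IndexError).
def Pre_minimum_time_at_tills (customers : List Int) (n_tills : Int) : Prop :=
  customers = [] ∨ 1 ≤ n_tills
instance (customers : List Int) (n_tills : Int) : Decidable (Pre_minimum_time_at_tills customers n_tills) := by
  unfold Pre_minimum_time_at_tills; infer_instance

def pvWitness_minimum_time_at_tills : List Int × Int := ([5, 3, 4], 2)

def Spec_minimum_time_at_tills (customers : List Int) (n_tills : Int) (out : Int) : Prop :=
  out = minimum_time_at_tills_alt customers n_tills
instance (customers : List Int) (n_tills : Int) (out : Int) : Decidable (Spec_minimum_time_at_tills customers n_tills out) := by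
  unfold Spec_minimum_time_at_tills; infer_instance

-- ===== CLAIM (what is proved, stated in full; the proofs are below) =====
def Claim_equal_minimum_time_at_tills : Prop := ∀ (customers : List Int) (n_tills : Int), Dom_minimum_time_at_tills customers n_tills → Pre_minimum_time_at_tills customers n_tills → Spec_minimum_time_at_tills customers n_tills (minimum_time_at_tills customers n_tills)

-- ===== LEMMAS AND PROOFS =====

-- linear ordered insert: the abstract effect of Source B's binary-search insert on a sorted list
def pvOrdIns (v : Int) : List Int → List Int
  | [] => [v]
  | y :: ys => if y < v then y :: pvOrdIns v ys else v :: y :: ys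

theorem pvOrdIns_perm (v : Int) (l : List Int) : (pvOrdIns v l).Perm (v :: l) := by
  induction l with
  | nil => simp [pvOrdIns]
  | cons y ys ih =>
    simp only [pvOrdIns]
    split_ifs
    · exact ((ih.cons y).trans (List.Perm.swap v y ys))
    · exact List.Perm.refl _

theorem pvOrdIns_ne_nil (v : Int) (l : List Int) : pvOrdIns v l ≠ [] := by
  cases l with
  | nil => simp [pvOrdIns]
  | cons y ys => simp only [pvOrdIns]; split_ifs <;> simp

theorem pvOrdIns_pairwise (v : Int) (l : List Int) (h : l.Pairwise (· ≤ ·)) :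
    (pvOrdIns v l).Pairwise (· ≤ ·) := by
  induction l with
  | nil => simp [pvOrdIns]
  | cons y ys ih =>
    rw [List.pairwise_cons] at h
    simp only [pvOrdIns]
    split_ifs with hy
    · rw [List.pairwise_cons]
      refine ⟨fun z hz => ?_, ih h.2⟩
      rcases List.mem_cons.mp (((pvOrdIns_perm v ys).mem_iff).mp hz) with rfl | hz
      · omega
      · exact h.1 z hz
    · rw [List.pairwise_cons]
      refine ⟨fun z hz => ?_, List.pairwise_cons.mpr h⟩
      rcases List.mem_cons.mp hz with rfl | hz
      · omega
      · exact le_trans (by omega) (h.1 z hz)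

theorem pairwise_getD_le {l : List Int} (h : l.Pairwise (· ≤ ·)) {i j : Nat}
    (hij : i ≤ j) (hj : j < l.length) : l.getD i 0 ≤ l.getD j 0 := by
  rcases Nat.eq_or_lt_of_le hij with rfl | hlt
  · exact le_refl _
  · rw [List.getD_eq_getElem l 0 (lt_of_le_of_lt hij hj), List.getD_eq_getElem l 0 hj]
    exact List.pairwise_iff_getElem.mp h i j (lt_of_le_of_lt hij hj) hj hlt

-- binary search correctness on a sorted list
theorem pvBS_spec (l : List Int) (v : Int) (h : l.Pairwise (· ≤ ·)) :
    ∀ (lo hi : Nat), lo ≤ hi → hi ≤ l.length →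
    (∀ j, j < lo → l.getD j 0 < v) → (∀ j, hi ≤ j → j < l.length → v ≤ l.getD j 0) →
    (pvBS l v lo hi ≤ l.length) ∧
    (∀ j, j < pvBS l v lo hi → l.getD j 0 < v) ∧
    (∀ j, pvBS l v lo hi ≤ j → j < l.length → v ≤ l.getD j 0) := by
  intro lo hi
  induction hlh : hi - lo using Nat.strong_induction_on generalizing lo hi with
  | _ n ih =>
    intro hle hhi hlo hhiV
    by_cases hlth : lo < hi
    · rw [pvBS, if_pos hlth]
      by_cases hmid : l.getD ((lo + hi) / 2) 0 < v
      · rw [if_pos hmid]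
        exact ih (hi - ((lo + hi) / 2 + 1)) (by omega) _ _ rfl (by omega) hhi
          (fun j hj => lt_of_le_of_lt
            (pairwise_getD_le h (by omega) (by omega)) hmid) hhiV
      · rw [if_neg hmid]
        exact ih ((lo + hi) / 2 - lo) (by omega) _ _ rfl (by omega) (by omega) hlo
          (fun j hj1 hj2 => le_trans (not_lt.mp hmid) (pairwise_getD_le h hj1 hj2))
    · rw [pvBS, if_neg hlth]
      exact ⟨by omega, fun j hj => hlo j hj, fun j hj1 hj2 => hhiV j (by omega) hj2⟩

-- inserting at a position with the binary-search property IS the ordered insert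
theorem insert_pos_eq_ordIns (v : Int) : ∀ (l : List Int) (r : Nat), r ≤ l.length →
    (∀ j, j < r → l.getD j 0 < v) → (∀ j, r ≤ j → j < l.length → v ≤ l.getD j 0) →
    l.take r ++ v :: l.drop r = pvOrdIns v l := by
  intro l
  induction l with
  | nil =>
    intro r hr _ _
    have : r = 0 := by simpa using hr
    subst this; simp [pvOrdIns]
  | cons y ys ih =>
    intro r hr hlt hge
    cases r with
    | zero =>
      have : v ≤ y := hge 0 (Nat.zero_le _) (by simp)
      simp [pvOrdIns, not_lt.mpr this]
    | succ r' =>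
      have hy : y < v := hlt 0 (Nat.succ_pos _)
      simp only [List.take_succ_cons, List.drop_succ_cons, List.cons_append, pvOrdIns, if_pos hy]
      congr 1
      exact ih r' (by simpa using hr)
        (fun j hj => by simpa using hlt (j + 1) (by omega))
        (fun j hj1 hj2 => by simpa using hge (j + 1) (by omega) (by simpa using hj2))

-- B's loop body on a sorted nonempty list is the ordered insert of (head + t)
theorem stepB_eq (m t : Int) (rest : List Int) (h : rest.Pairwise (· ≤ ·)) :
    PySem.List.insert rest ((pvBS rest (m + t) 0 rest.length : Nat) : Int) (m + t)
      = pvOrdIns (m + t) rest := by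
  obtain ⟨h1, h2, h3⟩ := pvBS_spec rest (m + t) h 0 rest.length (Nat.zero_le _) (le_refl _)
    (by omega) (by omega)
  rw [PySem.List.insert_natCast _ _ _ h1]
  exact insert_pos_eq_ordIns _ _ _ h1 h2 h3

-- A's min() on a list that is a permutation of a sorted nonempty list returns its head
theorem min?_of_perm_sorted {tills : List Int} {m : Int} {rest : List Int}
    (hp : tills.Perm (m :: rest)) (hs : (m :: rest).Pairwise (· ≤ ·)) :
    PySem.List.min? tills (fun x => x) = some m := by
  have hne : tills ≠ [] := by
    intro h; subst h; simpa using hp.length_eq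
  cases hmin : PySem.List.min? tills (fun x => x) with
  | none => exact absurd ((PySem.List.min?_eq_none_iff _ _).mp hmin) hne
  | some w =>
    have hwmem : w ∈ tills := PySem.List.min?_mem hmin
    have hmm : m ∈ tills := hp.mem_iff.mpr (List.mem_cons_self)
    have h1 : w ≤ m := PySem.List.min?_isMin hmin m hmm
    have h2 : m ≤ w := by
      rcases List.mem_cons.mp (hp.mem_iff.mp hwmem) with rfl | hw
      · exact le_refl _
      · exact (List.pairwise_cons.mp hs).1 w hw
    simp [le_antisymm h1 h2]

-- one A step stays a permutation of one B step
theorem stepA_perm (tills : List Int) (t m : Int) (rest : List Int)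
    (hp : tills.Perm (m :: rest)) :
    (match PySem.List.index? tills m with
      | none => tills
      | some i => PySem.List.pySetD tills (i : Int) (PySem.List.pyGetD tills (i : Int) 0 + t)).Perm
      ((m + t) :: rest) := by
  have hmm : m ∈ tills := hp.mem_iff.mpr List.mem_cons_self
  cases hidx : PySem.List.index? tills m with
  | none =>
    rw [PySem.List.index?_eq_none_iff] at hidx
    exact absurd hmm hidx
  | some i =>
    dsimp only
    obtain ⟨pre, suf, rfl, hlen, hnp⟩ := (PySem.List.index?_eq_some_iff _ _ _).mp hidx
    subst hlen
    rw [PySem.List.pyGetD_natCast, PySem.List.pySetD_natCast]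
    have hget : (pre ++ m :: suf).getD pre.length 0 = m := by
      rw [List.getD_eq_getElem _ 0 (by simp), List.getElem_append_right (le_refl _)]
      simp
    rw [hget]
    have hset : (pre ++ m :: suf).set pre.length (m + t) = pre ++ (m + t) :: suf := by
      rw [List.set_append_right _ _ (le_refl _)]
      simp
    rw [hset]
    have hps : (pre ++ suf).Perm rest :=
      (List.perm_middle.symm.trans hp).cons_inv
    exact List.perm_middle.trans ((hps.cons (m + t)))

-- the loop invariant, pushed through the whole fold
theorem fold_inv (cs : List Int) : ∀ (tills s : List Int), tills.Perm s →
    s.Pairwise (· ≤ ·) → s ≠ [] →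
    (cs.foldl (fun (tills : List Int) (time : Int) =>
      match PySem.List.min? tills (fun x => x) with
      | none => tills
      | some m =>
        match PySem.List.index? tills m with
        | none => tills
        | some i =>
          PySem.List.pySetD tills (i : Int) (PySem.List.pyGetD tills (i : Int) 0 + time)) tills).Perm
      (cs.foldl (fun (s : List Int) (t : Int) =>
        match s with
        | [] => []
        | m :: rest =>
          PySem.List.insert rest ((pvBS rest (m + t) 0 rest.length : Nat) : Int) (m + t)) s)
    ∧ (cs.foldl (fun (s : List Int) (t : Int) =>
        match s with
        | [] => []
        | m :: rest =>
          PySem.List.insert rest ((pvBS rest (m + t) 0 rest.length : Nat) : Int) (m + t)) s).Pairwise (· ≤ ·)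
    ∧ (cs.foldl (fun (s : List Int) (t : Int) =>
        match s with
        | [] => []
        | m :: rest =>
          PySem.List.insert rest ((pvBS rest (m + t) 0 rest.length : Nat) : Int) (m + t)) s) ≠ [] := by
  induction cs with
  | nil => intro tills s hp hs hne; exact ⟨hp, hs, hne⟩
  | cons t cs ih =>
    intro tills s hp hs hne
    obtain ⟨m, rest, rfl⟩ := List.exists_cons_of_ne_nil hne
    simp only [List.foldl_cons]
    have hrest : rest.Pairwise (· ≤ ·) := (List.pairwise_cons.mp hs).2
    rw [stepB_eq m t rest hrest, min?_of_perm_sorted hp hs]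
    dsimp only
    exact ih _ _ ((stepA_perm tills t m rest hp).trans (pvOrdIns_perm _ _).symm)
      (pvOrdIns_pairwise _ _ hrest) (pvOrdIns_ne_nil _ _)

theorem sorted_le_getLast : ∀ (s : List Int) (h : s ≠ []), s.Pairwise (· ≤ ·) →
    ∀ y ∈ s, y ≤ s.getLast h := by
  intro s
  induction s with
  | nil => intro h; exact absurd rfl h
  | cons x xs ih =>
    intro h hs y hy
    cases xs with
    | nil => simp at hy; simp [hy, List.getLast]
    | cons z zs =>
      rw [List.getLast_cons (by simp)]
      rcases List.mem_cons.mp hy with rfl | hy'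
      · exact le_trans ((List.pairwise_cons.mp hs).1 _ (List.getLast_mem _))
          (le_refl _)
      · exact ih (by simp) (List.pairwise_cons.mp hs).2 y hy'

-- A's max() on a permutation of a sorted nonempty list is its last element
theorem max?_of_perm_sorted {tills : List Int} {s : List Int} (hne : s ≠ [])
    (hp : tills.Perm s) (hs : s.Pairwise (· ≤ ·)) :
    PySem.List.max? tills (fun x => x) = some (s.getLast hne) := by
  have htne : tills ≠ [] := by
    intro h; subst h; exact hne (List.eq_nil_of_length_eq_zero hp.length_eq.symm)
  cases hmax : PySem.List.max? tills (fun x => x) with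
  | none => exact absurd ((PySem.List.max?_eq_none_iff _ _).mp hmax) htne
  | some w =>
    have hwmem : w ∈ s := hp.mem_iff.mp (PySem.List.max?_mem hmax)
    have hlm : s.getLast hne ∈ tills := hp.mem_iff.mpr (List.getLast_mem hne)
    have h1 : s.getLast hne ≤ w := PySem.List.max?_isMax hmax _ hlm
    have h2 : w ≤ s.getLast hne := sorted_le_getLast s hne hs w hwmem
    simp [le_antisymm h1 h2]

-- ===== VERDICT (by name: the statement is the Claim_ definition above) =====
theorem minimum_time_at_tills_spec : Claim_equal_minimum_time_at_tills := by
  intro customers n_tills _ hpre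
  unfold Spec_minimum_time_at_tills minimum_time_at_tills minimum_time_at_tills_alt
  by_cases hc : customers = []
  · simp [hc]
  · rcases hpre with rfl | hn
    · exact absurd rfl hc
    · rw [if_neg hc, if_neg hc]
      dsimp only
      have hrep : (List.replicate n_tills.toNat (0 : Int)).Pairwise (· ≤ ·) :=
        List.pairwise_replicate.mpr (Or.inr (le_refl _))
      have hrne : (List.replicate n_tills.toNat (0 : Int)) ≠ [] := by
        intro h
        have := congrArg List.length h
        simp at this
        omega
      obtain ⟨hp, hs, hne⟩ := fold_inv customers _ _ (List.Perm.refl _) hrep hrne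
      rw [max?_of_perm_sorted hne hp hs, PySem.List.pyGet?_neg_one,
        List.getLast?_eq_some_getLast hne]
      rfl
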